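-- pv_equiv track=rewrite | github.com/antoniocgj/Fast-Amortized-Bootstrapping | scripts/ks_estimator.py | pass1
-- ===== SOURCE A (Python) =====
-- N = 2048
--
-- def pass1(v:list, val):
--   res = v.copy()
--   for i in range(0, N, val):
--     for j in range(i, i + val):
--       if(j in res):
--         res.remove(j)
--         break
--   return res
-- ===== SOURCE B (Python) =====
-- N = 2048
--
-- def pass1(v: list, val):
--     blocks = range(0, N, val)   # same ValueError as A when val == 0
--     res = v.copy()
--     buckets = {}
--     for x in v:
--         buckets.setdefault(x // val, []).append(x)
--     for i in blocks:
--         group = buckets.get(i // val)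
--         if group:
--             res.remove(min(group))
--     return res
-- ===== Notes on version B (the rewrite author's own statement) =====
-- stated objective: faster
-- what changed: Replaces A's per-block lazy scan over the val candidate integers of each block (each candidate tested with a linear 'j in res' membership scan) by a single grouping pass over v building a dict of buckets keyed by x // val, then one lookup per block removing that block's minimum.
import Mathlib
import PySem

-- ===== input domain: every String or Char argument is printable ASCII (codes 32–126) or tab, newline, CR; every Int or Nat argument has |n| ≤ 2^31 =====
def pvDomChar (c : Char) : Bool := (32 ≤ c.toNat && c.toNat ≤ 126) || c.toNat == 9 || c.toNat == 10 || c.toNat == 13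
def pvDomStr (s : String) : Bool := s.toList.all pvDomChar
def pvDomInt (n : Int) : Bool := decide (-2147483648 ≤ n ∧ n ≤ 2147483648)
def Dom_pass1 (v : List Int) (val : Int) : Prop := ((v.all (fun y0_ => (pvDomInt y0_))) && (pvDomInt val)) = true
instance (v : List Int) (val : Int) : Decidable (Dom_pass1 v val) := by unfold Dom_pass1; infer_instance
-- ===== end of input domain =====

-- B replaces A's per-block integer scan with membership tests by a dict of buckets
-- (value // val → values) built in one pass, then removes each block's minimum; equivalence is on the return value.

-- ===== PORT A =====
-- inner loop 'for j in range(i, i+val): if j in res: res.remove(j); break'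
-- Python's range(i, i+val) is LAZY and the loop breaks at the first hit, so it is ported as a
-- counting recursion over j = i, i+1, … with fuel = len(range(i, i+val)) = val.toNat steps,
-- exactly the values the Python loop visits.
-- (res.remove(j) is guarded by 'j in res', so it always succeeds; getD is never taken on none)
def pass1Inner (res : List Int) (j : Int) : Nat → List Int
  | 0 => res
  | n + 1 => if res.contains j then (PySem.List.remove? res j).getD res else pass1Inner res (j + 1) n

def pass1 (v : List Int) (val : Int) : List Int :=
  (PySem.List.pyRange 0 2048 val).foldl
    (fun res i => pass1Inner res i val.toNat) v

-- ===== PORT B =====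
-- buckets: for x in v: buckets.setdefault(x // val, []).append(x)
def pass1BBuckets (v : List Int) (val : Int) : PySem.Dict Int (List Int) :=
  v.foldl (fun d x =>
    d.insert (PySem.Int.floordiv x val) ((d.getD (PySem.Int.floordiv x val) []) ++ [x]))
    PySem.Dict.empty

-- one block: group = buckets.get(i // val); if group: res.remove(min(group))
-- (min(group) is always present in res; getD is never taken on none)
def pass1BStep (val : Int) (buckets : PySem.Dict Int (List Int)) (res : List Int) (i : Int) : List Int :=
  match buckets.get? (PySem.Int.floordiv i val) with
  | none => res
  | some g =>
    if g.isEmpty then res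
    else
      match PySem.List.min? g (fun x => x) with
      | some m => (PySem.List.remove? res m).getD res
      | none => res

def pass1_alt (v : List Int) (val : Int) : List Int :=
  let blocks := PySem.List.pyRange 0 2048 val
  let buckets := pass1BBuckets v val
  blocks.foldl (fun res i => pass1BStep val buckets res i) v

-- ===== PRECONDITION & SPEC =====
-- Pre_ excludes only val = 0, where Python's range(0, N, 0) raises ValueError in both A and B.
def Pre_pass1 (v : List Int) (val : Int) : Prop := val ≠ 0
instance (v : List Int) (val : Int) : Decidable (Pre_pass1 v val) := by unfold Pre_pass1; infer_instance
def pvWitness_pass1 : List Int × Int := ([0, 1, 5, 5, 2049], 2)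

def Spec_pass1 (v : List Int) (val : Int) (out : List Int) : Prop := out = pass1_alt v val
instance (v : List Int) (val : Int) (out : List Int) : Decidable (Spec_pass1 v val out) := by unfold Spec_pass1; infer_instance

-- ===== CLAIM (what is proved, stated in full; the proofs are below) =====
def Claim_equal_pass1 : Prop := ∀ (v : List Int) (val : Int), Dom_pass1 v val → Pre_pass1 v val → Spec_pass1 v val (pass1 v val)

-- ===== LEMMAS AND PROOFS =====

lemma pyRange_neg_nil (val : Int) (h : val < 0) : PySem.List.pyRange 0 2048 val = [] := by
  simp [PySem.List.pyRange]
  omega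

lemma innerA_find (res : List Int) : ∀ (fuel : Nat) (a : Int),
    pass1Inner res a fuel =
      match (PySem.List.pyRange a (a + fuel) 1).find? (fun j => res.contains j) with
      | some j => (PySem.List.remove? res j).getD res
      | none => res := by
  intro fuel
  induction fuel with
  | zero =>
    intro a
    rw [PySem.List.pyRange_one_eq_nil (by omega)]
    rfl
  | succ n ih =>
    intro a
    rw [PySem.List.pyRange_one_cons (by push_cast; omega)]
    by_cases h : a ∈ res
    · simp [pass1Inner, List.find?, h]
    · have e : a + ((n + 1 : Nat) : Int) = (a + 1) + (n : Int) := by push_cast; ring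
      rw [e]
      simp [pass1Inner, List.find?, h, ih (a + 1)]

lemma buckets_get? (val key : Int) (v : List Int) : ∀ d : PySem.Dict Int (List Int),
    ((v.foldl (fun d x =>
        d.insert (PySem.Int.floordiv x val) ((d.getD (PySem.Int.floordiv x val) []) ++ [x])) d).get? key)
      = (if v.filter (fun x => PySem.Int.floordiv x val == key) = [] then d.get? key
         else some (d.getD key [] ++ v.filter (fun x => PySem.Int.floordiv x val == key))) := by
  induction v with
  | nil => intro d; simp
  | cons x xs ih =>
    intro d
    simp only [List.foldl_cons, List.filter_cons]
    by_cases hx : PySem.Int.floordiv x val = key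
    · subst hx
      rw [ih]
      simp only [beq_self_eq_true, if_pos, List.cons_ne_nil, if_neg]
      rw [PySem.Dict.get?_insert, PySem.Dict.getD_insert]
      by_cases hf : xs.filter (fun y => PySem.Int.floordiv y val == PySem.Int.floordiv x val) = []
      · simp [hf]
      · simp [hf]
    · have hbeq : (PySem.Int.floordiv x val == key) = false := by simp [hx]
      rw [ih]
      simp only [hbeq, Bool.false_eq_true, if_neg, cond_false]
      rw [PySem.Dict.get?_insert, PySem.Dict.getD_insert]
      simp [Ne.symm hx]

lemma find?_pyRange_one (p : Int → Bool) (b : Int) (m : Int) (hm : p m) :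
    ∀ a : Int, a ≤ m → m < b → (∀ j, a ≤ j → j < m → p j = false) →
    (PySem.List.pyRange a b 1).find? p = some m := by
  intro a
  induction hn : (m - a).toNat generalizing a with
  | zero =>
    intro h1 h2 _
    have : a = m := by omega
    subst this
    rw [PySem.List.pyRange_one_cons (by omega)]
    simp [List.find?, hm]
  | succ n ih =>
    intro h1 h2 hlt
    have ham : a < m := by omega
    rw [PySem.List.pyRange_one_cons (by omega)]
    have hpa : p a = false := hlt a le_rfl ham
    simp [List.find?, hpa]
    exact ih (a + 1) (by omega) (by omega) (by omega) (fun j hj1 hj2 => hlt j (by omega) hj2)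

lemma block_eq (v : List Int) (val : Int) (hval : 0 < val) (q : Int) (res : List Int)
    (hinv : ∀ x : Int, val * q ≤ x → (x ∈ res ↔ x ∈ v)) :
    pass1Inner res (val * q) val.toNat
      = pass1BStep val (pass1BBuckets v val) res (val * q)
    ∧ (∀ x : Int, val * (q + 1) ≤ x →
        (x ∈ pass1Inner res (val * q) val.toNat ↔ x ∈ v)) := by
  have hkey : PySem.Int.floordiv (val * q) val = q := by
    rw [PySem.Int.floordiv_eq_iff_of_pos hval]
    constructor <;> nlinarith
  set G := v.filter (fun x => PySem.Int.floordiv x val == q) with hGdef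
  have hG : ∀ x : Int, x ∈ G ↔ x ∈ v ∧ (val * q ≤ x ∧ x < val * q + val) := by
    intro x
    rw [hGdef, List.mem_filter, beq_iff_eq, PySem.Int.floordiv_eq_iff_of_pos hval]
    constructor <;> (rintro ⟨h1, h2, h3⟩; refine ⟨h1, by nlinarith, by nlinarith⟩)
  have hBget : (pass1BBuckets v val).get? (PySem.Int.floordiv (val * q) val)
      = (if G = [] then none else some G) := by
    rw [hkey, pass1BBuckets, buckets_get? val q v PySem.Dict.empty, ← hGdef]
    by_cases hf : G = []
    · rw [if_pos hf, if_pos hf, PySem.Dict.get?_empty]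
    · rw [if_neg hf, if_neg hf]
      simp only [PySem.Dict.getD, PySem.Dict.get?_empty, Option.getD, List.nil_append]
  by_cases hG0 : G = []
  · -- no element of this block in v: both sides leave res unchanged
    have hfind : (PySem.List.pyRange (val * q) (val * q + val) 1).find?
        (fun j => res.contains j) = none := by
      rw [List.find?_eq_none]
      intro j hj
      rw [PySem.List.mem_pyRange_one] at hj
      simp only [List.contains_iff_mem, decide_eq_true_eq] at *
      intro hjres
      have hjv : j ∈ v := (hinv j hj.1).mp hjres
      have : j ∈ G := (hG j).mpr ⟨hjv, hj.1, hj.2⟩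
      rw [hG0] at this; exact absurd this (List.not_mem_nil)
    have hA : pass1Inner res (val * q) val.toNat = res := by
      rw [innerA_find, show (val * q) + (val.toNat : Int) = val * q + val by
        rw [Int.toNat_of_nonneg (le_of_lt hval)], hfind]
    have hB : pass1BStep val (pass1BBuckets v val) res (val * q) = res := by
      rw [pass1BStep, hBget, if_pos hG0]
    refine ⟨hA.trans hB.symm, ?_⟩
    intro x hx
    rw [hA]
    exact hinv x (by nlinarith)
  · obtain ⟨m, hmin⟩ : ∃ m, PySem.List.min? G (fun x => x) = some m := by
      cases h : PySem.List.min? G (fun x => x) with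
      | none => exact absurd ((PySem.List.min?_eq_none_iff G _).mp h) hG0
      | some m => exact ⟨m, rfl⟩
    have hmG : m ∈ G := PySem.List.min?_mem hmin
    have hmv : m ∈ v := ((hG m).mp hmG).1
    have hmlo : val * q ≤ m := ((hG m).mp hmG).2.1
    have hmhi : m < val * q + val := ((hG m).mp hmG).2.2
    have hmres : m ∈ res := (hinv m hmlo).mpr hmv
    have hfind : (PySem.List.pyRange (val * q) (val * q + val) 1).find?
        (fun j => res.contains j) = some m := by
      apply find?_pyRange_one _ _ _ (by simpa using hmres) _ hmlo hmhi
      intro j hj1 hj2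
      rw [Bool.eq_false_iff]
      intro hc
      have hjres : j ∈ res := by simpa using hc
      have hjv : j ∈ v := (hinv j hj1).mp hjres
      have hjG : j ∈ G := (hG j).mpr ⟨hjv, hj1, by omega⟩
      have := PySem.List.min?_isMin hmin j hjG
      omega
    have hA : pass1Inner res (val * q) val.toNat
        = (PySem.List.remove? res m).getD res := by
      rw [innerA_find, show (val * q) + (val.toNat : Int) = val * q + val by
        rw [Int.toNat_of_nonneg (le_of_lt hval)], hfind]
    have hB : pass1BStep val (pass1BBuckets v val) res (val * q)
        = (PySem.List.remove? res m).getD res := by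
      rw [pass1BStep, hBget, if_neg hG0]
      simp only [List.isEmpty_iff, hG0, hmin]
      simp
    have herase : (PySem.List.remove? res m).getD res = res.erase m := by
      rw [PySem.List.remove?_eq_some_erase res m hmres]; rfl
    refine ⟨hA.trans hB.symm, ?_⟩
    intro x hx
    rw [hA, herase]
    have hxm : x ≠ m := by nlinarith [hmhi]
    rw [List.mem_erase_of_ne hxm]
    exact hinv x (by nlinarith)

lemma main_fold (v : List Int) (val : Int) (hval : 0 < val) :
    ∀ (n q : Nat) (res : List Int),
    (∀ x : Int, val * (q : Int) ≤ x → (x ∈ res ↔ x ∈ v)) →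
    ((List.range' q n).map (fun k : Nat => val * (k : Int))).foldl
        (fun res i => pass1Inner res i val.toNat) res
      = ((List.range' q n).map (fun k : Nat => val * (k : Int))).foldl
        (fun res i => pass1BStep val (pass1BBuckets v val) res i) res := by
  intro n
  induction n with
  | zero => intro q res _; rfl
  | succ n ih =>
    intro q res hinv
    simp only [List.range'_succ, List.map_cons, List.foldl_cons]
    obtain ⟨heq, hinv'⟩ := block_eq v val hval (q : Int) res hinv
    rw [heq]
    have hc : ((q : Int) + 1) = ((q + 1 : Nat) : Int) := by push_cast; ring
    exact ih (q + 1) _ (fun x hx => by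
      rw [← heq]
      exact hinv' x (by rw [hc]; exact_mod_cast hx))

lemma pass1_eq (v : List Int) (val : Int) (h : val ≠ 0) : pass1 v val = pass1_alt v val := by
  rcases lt_or_gt_of_ne h with hneg | hpos
  · simp [pass1, pass1_alt, pyRange_neg_nil val hneg]
  · rw [pass1, pass1_alt]
    rw [PySem.List.pyRange_of_pos 0 2048 hpos]
    simp only [zero_add, List.range_eq_range']
    exact main_fold v val hpos _ 0 v (fun x _ => Iff.rfl)

-- ===== VERDICT (by name: the statement is the Claim_ definition above) =====
theorem pass1_spec : Claim_equal_pass1 := by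
  intro v val _ hpre
  unfold Spec_pass1
  exact pass1_eq v val hpre
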